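-- pv_equiv track=rewrite | github.com/jimhorng/algorithm | basic_calculator_variable/solution2.py | _count_variables
-- ===== SOURCE A (Python) =====
-- def _count_variables(flattened_chars: list[str]) -> dict[str, int]:
--     counts: dict[str, int] = {}
--     next_sign = 1
--
--     for ch in flattened_chars:
--         if ch == "+":
--             next_sign = 1
--             continue
--
--         if ch == "-":
--             next_sign = -1
--             continue
--
--         counts.setdefault(ch, 0)
--         counts[ch] += next_sign
--         next_sign = 1
--
--     return counts
-- ===== SOURCE B (Python) =====
-- def _count_variables(flattened_chars: list[str]) -> dict[str, int]:
--     ops = ("+", "-")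
--     variables = [ch for ch in flattened_chars if ch not in ops]
--     negated = [b for a, b in zip(flattened_chars, flattened_chars[1:])
--                if a == "-" and b not in ops]
--     return {ch: variables.count(ch) - 2 * negated.count(ch)
--             for ch in dict.fromkeys(variables)}
-- ===== Notes on version B (the rewrite author's own statement) =====
-- stated objective: alternative
-- what changed: Replaces A's single streaming pass with a carried next_sign accumulator by staged counting: filter the variable tokens and the '-'-preceded variable tokens into two lists, then emit total_count - 2*negated_count per first-seen key via dict.fromkeys.
import Mathlib
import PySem

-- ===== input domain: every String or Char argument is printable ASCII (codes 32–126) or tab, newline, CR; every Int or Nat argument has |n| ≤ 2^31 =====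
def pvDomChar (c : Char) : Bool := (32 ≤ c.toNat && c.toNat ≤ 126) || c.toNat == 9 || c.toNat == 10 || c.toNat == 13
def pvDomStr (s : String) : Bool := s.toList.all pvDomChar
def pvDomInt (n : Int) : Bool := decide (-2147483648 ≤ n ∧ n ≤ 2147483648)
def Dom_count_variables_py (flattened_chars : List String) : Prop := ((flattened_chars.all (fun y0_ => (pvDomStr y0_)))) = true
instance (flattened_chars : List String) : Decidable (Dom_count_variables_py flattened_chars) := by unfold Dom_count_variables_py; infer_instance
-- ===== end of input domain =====

-- B replaces A's streaming signed accumulation by staged counting: filter the variable tokens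
-- and the negated tokens into two lists, then return total − 2·negated per first-seen key (objective: alternative).

-- ===== PORT A =====
-- loop body of A: update (counts, next_sign) by one char
def pvStepA (st : PySem.Dict String Int × Int) (ch : String) : PySem.Dict String Int × Int :=
  if ch == "+" then (st.1, 1)
  else if ch == "-" then (st.1, -1)
  else (st.1.insert ch (st.1.getD ch 0 + st.2), 1)

def count_variables_py (flattened_chars : List String) : List (String × Int) :=
  (flattened_chars.foldl pvStepA (PySem.Dict.empty, 1)).1.items

-- ===== PORT B =====
def pvIsOp (ch : String) : Bool := ch == "+" || ch == "-"

def count_variables_py_alt (flattened_chars : List String) : List (String × Int) :=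
  let vlist := flattened_chars.filter (fun ch => !pvIsOp ch)
  let negated := (List.zip flattened_chars (PySem.List.slice flattened_chars (some 1) none)).filterMap
    (fun p => if p.1 == "-" && !pvIsOp p.2 then some p.2 else none)
  (PySem.List.dedup vlist).map
    (fun ch => (ch, (vlist.count ch : Int) - 2 * (negated.count ch : Int)))

-- ===== PRECONDITION & SPEC =====
def Spec_count_variables_py (flattened_chars : List String) (out : List (String × Int)) : Prop := out = count_variables_py_alt flattened_chars
instance (flattened_chars : List String) (out : List (String × Int)) : Decidable (Spec_count_variables_py flattened_chars out) := by unfold Spec_count_variables_py; infer_instance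

-- ===== CLAIM (what is proved, stated in full; the proofs are below) =====
def Claim_equal_count_variables_py : Prop := ∀ (flattened_chars : List String), Dom_count_variables_py flattened_chars → Spec_count_variables_py flattened_chars (count_variables_py flattened_chars)

-- ===== LEMMAS AND PROOFS =====
-- the sign A's accumulator holds after having just seen char-option p
def pvSign (p : Option String) : Int := if p == some "-" then -1 else 1

-- signed count of k over xs, with p the char just before xs (A's semantics, stateless)
def pvSC (p : Option String) (xs : List String) (k : String) : Int :=
  match xs with
  | [] => 0
  | x :: t =>
    if pvIsOp x then pvSC (some x) t k
    else (if x = k then pvSign p else 0) + pvSC (some x) t k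

-- the negated variable tokens of xs, with p the char just before xs
def pvNeg (p : Option String) (xs : List String) : List String :=
  match xs with
  | [] => []
  | x :: t => (if p == some "-" && !pvIsOp x then [x] else []) ++ pvNeg (some x) t

theorem pv_getD_foldA (xs : List String) : ∀ (p : Option String) (d : PySem.Dict String Int) (k : String),
    ((xs.foldl pvStepA (d, pvSign p)).1).getD k 0 = d.getD k 0 + pvSC p xs k := by
  induction xs with
  | nil => intro p d k; simp [pvSC]
  | cons x t ih =>
    intro p d k
    by_cases hp : x = "+"
    · subst hp
      have : pvStepA (d, pvSign p) "+" = (d, pvSign (some "+")) := rfl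
      simp only [List.foldl_cons, this, ih, pvSC, pvIsOp]
      simp
    · by_cases hm : x = "-"
      · subst hm
        have : pvStepA (d, pvSign p) "-" = (d, pvSign (some "-")) := rfl
        simp only [List.foldl_cons, this, ih, pvSC, pvIsOp]
        simp
      · have hstep : pvStepA (d, pvSign p) x
            = (d.insert x (d.getD x 0 + pvSign p), pvSign (some x)) := by
          simp [pvStepA, pvSign, hp, hm]
        have hop : pvIsOp x = false := by simp [pvIsOp, hp, hm]
        simp only [List.foldl_cons, hstep, ih, pvSC, hop, Bool.false_eq_true, if_false,
          PySem.Dict.getD_insert]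
        by_cases hk : k = x
        · subst hk; simp; ring
        · simp [hk, Ne.symm hk]

theorem pv_keys_foldA (xs : List String) : ∀ (p : Option String) (d : PySem.Dict String Int),
    (xs.foldl pvStepA (d, pvSign p)).1.keys
      = PySem.Set.update d.keys (xs.filter (fun ch => !pvIsOp ch)) := by
  induction xs with
  | nil => intro p d; simp [PySem.Set.update_nil]
  | cons x t ih =>
    intro p d
    by_cases hp : x = "+"
    · subst hp
      have : pvStepA (d, pvSign p) "+" = (d, pvSign (some "+")) := rfl
      simp only [List.foldl_cons, this, ih]
      simp [pvIsOp]
    · by_cases hm : x = "-"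
      · subst hm
        have : pvStepA (d, pvSign p) "-" = (d, pvSign (some "-")) := rfl
        simp only [List.foldl_cons, this, ih]
        simp [pvIsOp]
      · have hstep : pvStepA (d, pvSign p) x
            = (d.insert x (d.getD x 0 + pvSign p), pvSign (some x)) := by
          simp [pvStepA, pvSign, hp, hm]
        have hop : pvIsOp x = false := by simp [pvIsOp, hp, hm]
        have hkeys : (d.insert x (d.getD x 0 + pvSign p)).keys = PySem.Set.add d.keys x := by
          by_cases hc : d.contains x = true
          · rw [PySem.Dict.keys_insert_of_contains (h := hc), PySem.Set.add_of_mem]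
            exact (PySem.Dict.contains_iff_mem_keys _ _).mp hc
          · rw [PySem.Dict.keys_insert_of_not_contains (h := by simpa using hc),
                PySem.Set.add_of_not_mem]
            intro hmem
            exact hc ((PySem.Dict.contains_iff_mem_keys _ _).mpr hmem)
        simp only [List.foldl_cons, hstep, ih, List.filter_cons, hop]
        simp [hkeys, PySem.Set.update_cons]

theorem pv_nodup_foldA (xs : List String) : ∀ (p : Option String) (d : PySem.Dict String Int),
    d.keys.Nodup → (xs.foldl pvStepA (d, pvSign p)).1.keys.Nodup := by
  induction xs with
  | nil => intro p d h; exact h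
  | cons x t ih =>
    intro p d h
    by_cases hp : x = "+"
    · subst hp; exact ih (some "+") d h
    · by_cases hm : x = "-"
      · subst hm; exact ih (some "-") d h
      · have hstep : pvStepA (d, pvSign p) x
            = (d.insert x (d.getD x 0 + pvSign p), pvSign (some x)) := by
          simp [pvStepA, pvSign, hp, hm]
        simp only [List.foldl_cons, hstep]
        exact ih (some x) _ (PySem.Dict.nodup_keys_insert _ _ _ h)

-- B's pairwise 'negated' comprehension computes pvNeg
theorem pv_neg_zip_aux (t : List String) : ∀ (x : String),
    (List.zip (x :: t) t).filterMap
        (fun p => if p.1 == "-" && !pvIsOp p.2 then some p.2 else none)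
      = pvNeg (some x) t := by
  induction t with
  | nil => intro x; rfl
  | cons y t' ih =>
    intro x
    simp only [List.zip_cons_cons, List.filterMap_cons, pvNeg, ih y]
    by_cases h : (x == "-" && !pvIsOp y) = true
    · simp [h]
    · simp [h]

theorem pv_neg_zip (xs : List String) :
    (List.zip xs (PySem.List.slice xs (some 1) none)).filterMap
        (fun p => if p.1 == "-" && !pvIsOp p.2 then some p.2 else none)
      = pvNeg none xs := by
  rw [PySem.List.slice_from_one]
  cases xs with
  | nil => rfl
  | cons x t =>
    simp only [List.tail_cons, pvNeg]
    simpa using pv_neg_zip_aux t x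

-- the signed count is (occurrences) − 2·(negated occurrences)
theorem pv_sc_eq (xs : List String) : ∀ (p : Option String) (k : String),
    pvSC p xs k = ((xs.filter (fun ch => !pvIsOp ch)).count k : Int)
                    - 2 * ((pvNeg p xs).count k : Int) := by
  induction xs with
  | nil => intro p k; simp [pvSC, pvNeg]
  | cons x t ih =>
    intro p k
    by_cases hop : pvIsOp x = true
    · simp only [pvSC, pvNeg, hop, if_true, List.filter_cons, Bool.not_true,
        Bool.false_eq_true, if_false, Bool.and_false, List.nil_append]
      simpa using ih (some x) k
    · have hop' : pvIsOp x = false := by simpa using hop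
      simp only [pvSC, pvNeg, hop', Bool.false_eq_true, if_false, List.filter_cons,
        Bool.not_false, if_true, List.count_cons, List.count_append]
      rw [ih (some x) k]
      by_cases hpm : p = some "-"
      · subst hpm
        by_cases hk : x = k
        · subst hk; simp [pvSign]; ring
        · simp [hk]
      · have hpb : (p == some "-") = false := by
          cases p <;> simp_all
        by_cases hk : x = k
        · subst hk; simp [pvSign, hpb]; ring
        · simp [hpb, hk]

-- ===== VERDICT (by name: the statement is the Claim_ definition above) =====
theorem count_variables_py_spec : Claim_equal_count_variables_py := by
  intro xs _
  unfold Spec_count_variables_py count_variables_py count_variables_py_alt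
  have hA : xs.foldl pvStepA (PySem.Dict.empty, (1 : Int))
      = xs.foldl pvStepA (PySem.Dict.empty, pvSign none) := rfl
  rw [hA]
  dsimp only
  have hnd : (xs.foldl pvStepA (PySem.Dict.empty, pvSign none)).1.keys.Nodup :=
    pv_nodup_foldA xs none _ (by simp)
  rw [PySem.Dict.items_eq_map_keys _ hnd 0, pv_keys_foldA xs none]
  have hkeys : PySem.Set.update (PySem.Dict.empty : PySem.Dict String Int).keys
      (xs.filter (fun ch => !pvIsOp ch))
      = PySem.List.dedup (xs.filter (fun ch => !pvIsOp ch)) := by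
    simp [PySem.Set.update_nil_left, PySem.Dict.keys_empty]
  rw [hkeys, pv_neg_zip]
  apply List.map_congr_left
  intro k _
  have h := pv_getD_foldA xs none PySem.Dict.empty k
  rw [h, pv_sc_eq xs none k]
  simp [PySem.Dict.getD_empty]
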